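-- pv_equiv track=rewrite | github.com/IETAnalysis/S-F-GNN | DTT-creat.py | separate_bidirectional_flows
-- ===== SOURCE A (Python) =====
-- from typing import List, Tuple, Dict, Optional
--
-- def separate_bidirectional_flows(packets: List[Dict]) -> Tuple[List[Dict], List[Dict]]:
--     if not packets: return [], []
--     first_packet_idx = -1
--     for i, p in enumerate(packets):
--         if 'src_port' in p: first_packet_idx = i; break
--     if first_packet_idx == -1: return [], []
--     first = packets[first_packet_idx]
--     src_ip, dst_ip, src_port, dst_port = first['src_ip'], first['dst_ip'], first['src_port'], first['dst_port']
--     fwd, bwd = [], []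
--     for p in packets:
--         if 'src_port' not in p: continue
--         if (p['src_ip'] == src_ip and p['src_port'] == src_port and p['dst_ip'] == dst_ip and p['dst_port'] == dst_port):
--             fwd.append(p)
--         elif (p['src_ip'] == dst_ip and p['src_port'] == dst_port and p['dst_ip'] == src_ip and p['dst_port'] == src_port):
--             bwd.append(p)
--     return fwd, bwd
-- ===== SOURCE B (Python) =====
-- from typing import List, Tuple, Dict
--
-- def separate_bidirectional_flows(packets: List[Dict]) -> Tuple[List[Dict], List[Dict]]:
--     # Group-by-key approach: extract (direction-key, packet) pairs, bucket them in a
--     # dict indexed by the 4-tuple, then answer with two dictionary lookups.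
--     keyed = [((p['src_ip'], p['dst_ip'], p['src_port'], p['dst_port']), p)
--              for p in packets if 'src_port' in p]
--     if not keyed:
--         return [], []
--     buckets = {}
--     for k, p in keyed:
--         buckets.setdefault(k, []).append(p)
--     ref = keyed[0][0]
--     rev = (ref[1], ref[0], ref[3], ref[2])
--     return buckets[ref], (buckets.get(rev, []) if rev != ref else [])
-- ===== Notes on version B (the rewrite author's own statement) =====
-- stated objective: alternative
-- what changed: Instead of A's find-first-reference pass followed by a per-packet four-field comparison pass, B extracts (4-tuple key, packet) pairs, groups all valid packets into a dict of buckets indexed by their direction tuple, and answers with two dictionary lookups (the first key and its reversal), so no packet is ever compared against the reference.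
import Mathlib
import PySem

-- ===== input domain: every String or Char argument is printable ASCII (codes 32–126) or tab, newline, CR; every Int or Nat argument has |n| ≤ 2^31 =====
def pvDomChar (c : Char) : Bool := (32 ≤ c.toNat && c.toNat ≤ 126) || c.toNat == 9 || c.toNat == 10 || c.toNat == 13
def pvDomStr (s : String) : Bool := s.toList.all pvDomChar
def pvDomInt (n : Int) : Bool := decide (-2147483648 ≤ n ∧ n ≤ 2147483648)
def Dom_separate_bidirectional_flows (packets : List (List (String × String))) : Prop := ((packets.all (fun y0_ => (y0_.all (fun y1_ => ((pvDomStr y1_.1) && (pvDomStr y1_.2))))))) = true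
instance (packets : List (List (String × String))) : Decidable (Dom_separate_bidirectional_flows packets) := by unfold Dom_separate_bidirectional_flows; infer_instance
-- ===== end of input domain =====

-- B replaces A's reference-comparison classification by grouping all valid packets into a
-- dict of buckets keyed by their direction 4-tuple and answering with two lookups
-- (objective: alternative decomposition via a hash index).

-- shared helpers: a packet is a Python dict; 'k in p' and p[k] on its association list
def pkHas (p : List (String × String)) (k : String) : Bool :=
  (PySem.Dict.mk p).contains k
-- total stand-in for p[k]: Pre_ guarantees the key is present wherever either Python reads it
-- (Python raises KeyError there otherwise)
def pkGet (p : List (String × String)) (k : String) : String :=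
  ((PySem.Dict.mk p).get? k).getD ""

-- ===== PORT A =====
-- A's first loop: find the first packet containing 'src_port' (break)
def pvFindFirstValid : List (List (String × String)) → Option (List (String × String))
  | [] => none
  | p :: ps => if pkHas p "src_port" then some p else pvFindFirstValid ps

-- A's second loop: classify every valid packet against the first packet's four fields
def pvClassifyA (s d sp dp : String) :
    List (List (String × String)) → (List (List (String × String))) × (List (List (String × String)))
  | [] => ([], [])
  | p :: ps =>
    let r := pvClassifyA s d sp dp ps
    if pkHas p "src_port" = false then r
    else if pkGet p "src_ip" = s ∧ pkGet p "src_port" = sp ∧ pkGet p "dst_ip" = d ∧ pkGet p "dst_port" = dp then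
      (p :: r.1, r.2)
    else if pkGet p "src_ip" = d ∧ pkGet p "src_port" = dp ∧ pkGet p "dst_ip" = s ∧ pkGet p "dst_port" = sp then
      (r.1, p :: r.2)
    else r

def separate_bidirectional_flows (packets : List (List (String × String))) : (List (List (String × String))) × (List (List (String × String))) :=
  if packets = [] then ([], [])
  else
    match pvFindFirstValid packets with
    | none => ([], [])
    | some first =>
      pvClassifyA (pkGet first "src_ip") (pkGet first "dst_ip") (pkGet first "src_port") (pkGet first "dst_port") packets

-- ===== PORT B =====
-- the direction key of a valid packet
def pvKeyOf (p : List (String × String)) : String × String × String × String :=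
  (pkGet p "src_ip", pkGet p "dst_ip", pkGet p "src_port", pkGet p "dst_port")

def separate_bidirectional_flows_alt (packets : List (List (String × String))) : (List (List (String × String))) × (List (List (String × String))) :=
  -- keyed = [((src,dst,sp,dp), p) for p in packets if 'src_port' in p]
  let keyed := (packets.filter (fun p => pkHas p "src_port")).map (fun p => (pvKeyOf p, p))
  match keyed with
  | [] => ([], [])
  | (ref, _) :: _ =>
    -- buckets.setdefault(k, []).append(p)  ==  buckets[k] = buckets.get(k, []) + [p]
    let buckets := keyed.foldl (fun d kp => d.modify kp.1 [] (· ++ [kp.2])) PySem.Dict.empty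
    let rev := (ref.2.1, ref.1, ref.2.2.2, ref.2.2.1)
    (buckets.getD ref [], if rev ≠ ref then buckets.getD rev [] else [])

-- ===== PRECONDITION & SPEC =====
-- Pre_ excludes (a) inputs on which the Python A raises KeyError — a packet containing
-- 'src_port' but missing one of the other three keys; A still RETURNS on some of these
-- when `and` short-circuits before the missing key, but B naturally raises there too —
-- and (b) association lists with duplicate keys, which a Python dict cannot represent.
def Pre_separate_bidirectional_flows (packets : List (List (String × String))) : Prop :=
  (∀ p ∈ packets, (p.map Prod.fst).Nodup) ∧
  (∀ p ∈ packets, pkHas p "src_port" = true →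
    pkHas p "src_ip" = true ∧ pkHas p "dst_ip" = true ∧ pkHas p "dst_port" = true)
instance (packets : List (List (String × String))) : Decidable (Pre_separate_bidirectional_flows packets) := by
  unfold Pre_separate_bidirectional_flows; infer_instance

def pvWitness_separate_bidirectional_flows : (List (List (String × String))) :=
  [[("src_ip", "a"), ("dst_ip", "b"), ("src_port", "1"), ("dst_port", "2")],
   [("note", "no port")],
   [("src_ip", "b"), ("dst_ip", "a"), ("src_port", "2"), ("dst_port", "1")]]

def Spec_separate_bidirectional_flows (packets : List (List (String × String))) (out : (List (List (String × String))) × (List (List (String × String)))) : Prop := out = separate_bidirectional_flows_alt packets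
instance (packets : List (List (String × String))) (out : (List (List (String × String))) × (List (List (String × String)))) : Decidable (Spec_separate_bidirectional_flows packets out) := by unfold Spec_separate_bidirectional_flows; infer_instance

-- ===== CLAIM (what is proved, stated in full; the proofs are below) =====
def Claim_equal_separate_bidirectional_flows : Prop := ∀ (packets : List (List (String × String))), Dom_separate_bidirectional_flows packets → Pre_separate_bidirectional_flows packets → Spec_separate_bidirectional_flows packets (separate_bidirectional_flows packets)

-- ===== LEMMAS AND PROOFS =====

theorem findFirst_eq_head (ps : List (List (String × String))) :
    pvFindFirstValid ps = (ps.filter (fun p => pkHas p "src_port")).head? := by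
  induction ps with
  | nil => rfl
  | cons p ps ih =>
    by_cases h : pkHas p "src_port" <;> simp [pvFindFirstValid, h, ih]

-- A's classification pass characterised as two filters on the direction key
theorem classifyA_filter (s d sp dp : String) (ps : List (List (String × String))) :
    pvClassifyA s d sp dp ps =
      (ps.filter (fun p => pkHas p "src_port" && (pvKeyOf p == (s, d, sp, dp))),
       ps.filter (fun p => pkHas p "src_port" && !(pvKeyOf p == (s, d, sp, dp)) && (pvKeyOf p == (d, s, dp, sp)))) := by
  induction ps with
  | nil => rfl
  | cons p ps ih =>
    rw [pvClassifyA, ih]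
    by_cases hv : pkHas p "src_port"
    · by_cases h1 : pvKeyOf p = (s, d, sp, dp)
      · have hc1 : pkGet p "src_ip" = s ∧ pkGet p "src_port" = sp ∧ pkGet p "dst_ip" = d ∧ pkGet p "dst_port" = dp := by
          simp [pvKeyOf, Prod.ext_iff] at h1; tauto
        simp [hv, hc1, h1]
      · have hc1 : ¬ (pkGet p "src_ip" = s ∧ pkGet p "src_port" = sp ∧ pkGet p "dst_ip" = d ∧ pkGet p "dst_port" = dp) := by
          simp [pvKeyOf, Prod.ext_iff] at h1 ⊢; tauto
        by_cases h2 : pvKeyOf p = (d, s, dp, sp)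
        · have hc2 : pkGet p "src_ip" = d ∧ pkGet p "src_port" = dp ∧ pkGet p "dst_ip" = s ∧ pkGet p "dst_port" = sp := by
            simp [pvKeyOf, Prod.ext_iff] at h2; tauto
          have h1' : ¬(d = s ∧ dp = sp) := by
            rintro ⟨e1, e2⟩; exact h1 (by rw [h2]; subst e1; subst e2; rfl)
          have hL : ¬(d = s ∧ dp = sp ∧ s = d ∧ sp = dp) := fun h => h1' ⟨h.1, h.2.1⟩
          have hL2 : ¬(d = s ∧ s = d ∧ dp = sp ∧ sp = dp) := fun h => h1' ⟨h.1, h.2.2.1⟩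
          have hR : (d = s → s = d → dp = sp → ¬sp = dp) := fun e1 _ e2 _ => h1' ⟨e1, e2⟩
          simp [hv, hc2, h2, hL, hL2]
        · have hc2 : ¬ (pkGet p "src_ip" = d ∧ pkGet p "src_port" = dp ∧ pkGet p "dst_ip" = s ∧ pkGet p "dst_port" = sp) := by
            simp [pvKeyOf, Prod.ext_iff] at h2 ⊢; tauto
          simp [hv, hc1, hc2, h1, h2]
    · simp [hv]

-- B's bucket lookup at any key c is the filter of the valid packets with that key
theorem bucket_lookup (packets : List (List (String × String))) (c : String × String × String × String) :
    (((packets.filter (fun p => pkHas p "src_port")).map (fun p => (pvKeyOf p, p))).foldl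
        (fun d kp => d.modify kp.1 [] (· ++ [kp.2])) PySem.Dict.empty).getD c [] =
      packets.filter (fun p => pkHas p "src_port" && (pvKeyOf p == c)) := by
  rw [PySem.Dict.getD_foldl_modify_append, PySem.Dict.getD_empty]
  rw [List.filter_map, List.map_map]
  simp [List.filter_filter, Function.comp_def, Bool.and_comm]

theorem sep_eq_alt (packets : List (List (String × String))) :
    separate_bidirectional_flows packets = separate_bidirectional_flows_alt packets := by
  unfold separate_bidirectional_flows separate_bidirectional_flows_alt
  cases hf : (packets.filter (fun p => pkHas p "src_port")).map (fun p => (pvKeyOf p, p)) with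
  | nil =>
    have hnone : pvFindFirstValid packets = none := by
      rw [findFirst_eq_head]
      simp only [List.map_eq_nil_iff] at hf
      simp [hf]
    cases packets <;> simp [hnone]
  | cons hd tl =>
    obtain ⟨ref, first⟩ := hd
    have hvalid : (packets.filter (fun p => pkHas p "src_port")) ≠ [] := by
      intro h; rw [h] at hf; simp at hf
    have hhead : (packets.filter (fun p => pkHas p "src_port")).head? = some first ∧ pvKeyOf first = ref := by
      cases hq : packets.filter (fun p => pkHas p "src_port") with
      | nil => exact absurd hq hvalid
      | cons q qs => rw [hq] at hf; simp at hf; exact ⟨by simp [hf.1.2], hf.1.2 ▸ hf.1.1⟩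
    have hsome : pvFindFirstValid packets = some first := by
      rw [findFirst_eq_head, hhead.1]
    have hne : packets ≠ [] := by
      intro h; subst h; simp at hvalid
    simp only [hne, if_false, hsome]
    obtain ⟨s, d, sp, dp⟩ := ref
    have hk : pkGet first "src_ip" = s ∧ pkGet first "dst_ip" = d ∧ pkGet first "src_port" = sp ∧ pkGet first "dst_port" = dp := by
      have := hhead.2; simp [pvKeyOf, Prod.ext_iff] at this; tauto
    rw [hk.1, hk.2.1, hk.2.2.1, hk.2.2.2, classifyA_filter]
    rw [← hf]
    dsimp only
    refine Prod.ext ?_ ?_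
    · exact (bucket_lookup packets (s, d, sp, dp)).symm
    · by_cases hrev : (d, s, dp, sp) ≠ (s, d, sp, dp)
      · simp only [hrev, ne_eq, not_false_iff, if_true]
        rw [bucket_lookup packets (d, s, dp, sp)]
        apply List.filter_congr
        intro p _
        have hx : (!(pvKeyOf p == (s, d, sp, dp))) = true ∨ (pvKeyOf p == (d, s, dp, sp)) = false := by
          by_cases h2 : pvKeyOf p = (d, s, dp, sp)
          · left; simp [h2, hrev]
          · right; simp [h2]
        rcases hx with hx | hx <;> simp [hx]
      · simp only [ne_eq, not_not] at hrev
        simp only [hrev, ne_eq, not_true_eq_false, if_false]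
        rw [List.filter_eq_nil_iff]
        intro p _
        by_cases h1 : pvKeyOf p = (s, d, sp, dp) <;> simp [h1]

-- ===== VERDICT (by name: the statement is the Claim_ definition above) =====
theorem separate_bidirectional_flows_spec : Claim_equal_separate_bidirectional_flows := by
  intro packets _ _
  unfold Spec_separate_bidirectional_flows
  exact sep_eq_alt packets
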